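-- pv_equiv track=rewrite | github.com/YousefShahin10/3xb3_final_project | part4.py | bsp_solution3
-- ===== SOURCE A (Python) =====
-- def bsp_solution3(L, m):
--     for _ in range(m):
--         min_dist = float('inf')
--         min_index = 0
--         for i in range(len(L)-2):
--             if L[i+2]-L[i] < min_dist:
--                 min_dist = L[i+2]-L[i]
--                 min_index = i
--         L.pop(min_index+1)
--     return L
-- ===== SOURCE B (Python) =====
-- def bsp_solution3(L, m):
--     # Maintain the list of spans L[i+2]-L[i] incrementally: each removal
--     # changes at most two spans, so only those are recomputed.
--     spans = [b - a for a, b in zip(L, L[2:])]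
--     for _ in range(m):
--         k = min(range(len(spans)), key=spans.__getitem__, default=0)
--         del L[k + 1]
--         if spans:
--             del spans[k]
--             if k >= 1:
--                 spans[k - 1] = L[k + 1] - L[k - 1]
--             if k < len(spans):
--                 spans[k] = L[k + 2] - L[k]
--     return L
-- ===== Notes on version B (the rewrite author's own statement) =====
-- stated objective: alternative
-- what changed: B keeps the list of spans L[i+2]-L[i] as explicit state updated incrementally (a removal changes at most two spans) and picks the argmin with min() over that maintained array, instead of recomputing every difference with an indexed Python loop on each pass.
import Mathlib
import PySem

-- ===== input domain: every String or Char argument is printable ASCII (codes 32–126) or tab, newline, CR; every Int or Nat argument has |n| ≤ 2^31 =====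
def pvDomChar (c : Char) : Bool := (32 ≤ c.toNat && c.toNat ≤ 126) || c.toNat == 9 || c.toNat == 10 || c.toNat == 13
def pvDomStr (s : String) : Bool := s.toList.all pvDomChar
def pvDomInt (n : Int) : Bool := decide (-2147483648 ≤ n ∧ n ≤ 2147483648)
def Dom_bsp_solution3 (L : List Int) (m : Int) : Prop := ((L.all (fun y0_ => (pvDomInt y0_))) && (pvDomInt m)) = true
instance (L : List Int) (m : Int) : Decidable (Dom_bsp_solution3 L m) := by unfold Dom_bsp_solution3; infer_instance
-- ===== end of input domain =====

-- B maintains the list of adjacent-removal spans incrementally (each removal changes at most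
-- two spans) instead of recomputing every difference L[i+2]-L[i] on every pass; objective:
-- alternative state maintenance, same greedy result.  Python A mutates L in place (pop); the
-- equivalence proved here is about the RETURN value only.

-- ===== PORT A =====
-- inner 'for i in range(len(L)-2)' scan; min_dist = float('inf') is modelled as Option Int
-- (none = inf, which every int is below); indices i, i+2 are always in range inside the loop,
-- so pyGetD with default 0 is exact there.
def aArgmin (L : List Int) : Option Int × Int :=
  (PySem.List.pyRange 0 ((L.length : Int) - 2) 1).foldl
    (fun st i =>
      let d := PySem.List.pyGetD L (i + 2) 0 - PySem.List.pyGetD L i 0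
      match st.1 with
      | none => (some d, i)
      | some md => if d < md then (some d, i) else st)
    (none, 0)

-- one pass of A's outer loop: find min_index, then L.pop(min_index+1)
-- (pop? = none is Python's IndexError; those inputs are outside Pre_, the port keeps L there)
def aStep (L : List Int) : List Int :=
  match PySem.List.pop? L ((aArgmin L).2 + 1) with
  | some r => r.2
  | none => L

def bsp_solution3 (L : List Int) (m : Int) : List Int :=
  (PySem.List.pyRange 0 m 1).foldl (fun cur _ => aStep cur) L

-- ===== PORT B =====
-- spans = [b - a for a, b in zip(L, L[2:])]
def mkSpans (L : List Int) : List Int :=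
  (L.zip (L.drop 2)).map (fun p => p.2 - p.1)

-- one pass of B's loop over the state (L, spans):
-- k = min(range(len(spans)), key=spans.__getitem__, default=0); del L[k+1]; local span updates.
-- all reads L[k-1], L[k+1], L[k+2] are in range when they happen, so pyGetD 0 is exact there;
-- 'del L[k+1]' raises only outside Pre_, where eraseIdx is a no-op.
def bStep (st : List Int × List Int) : List Int × List Int :=
  let L := st.1
  let spans := st.2
  let k : Int :=
    ((PySem.List.min? (PySem.List.pyRange 0 (spans.length : Int) 1)
        (fun i => PySem.List.pyGetD spans i 0)).getD 0)
  let L' := L.eraseIdx (k + 1).toNat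
  if spans.isEmpty then (L', spans)
  else
    let s1 := spans.eraseIdx k.toNat
    let s2 := if 1 ≤ k then
        s1.set (k - 1).toNat (PySem.List.pyGetD L' (k + 1) 0 - PySem.List.pyGetD L' (k - 1) 0)
      else s1
    let s3 := if k < (s2.length : Int) then
        s2.set k.toNat (PySem.List.pyGetD L' (k + 2) 0 - PySem.List.pyGetD L' k 0)
      else s2
    (L', s3)

def bsp_solution3_alt (L : List Int) (m : Int) : List Int :=
  ((PySem.List.pyRange 0 m 1).foldl (fun st _ => bStep st) (L, mkSpans L)).1

-- ===== PRECONDITION & SPEC =====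
-- Pre_ excludes exactly the inputs where Python A raises IndexError: it pops one element per
-- iteration and pop(min_index+1) needs at least 2 elements, so A returns iff m ≤ 0 or len(L) ≥ m+1.
def Pre_bsp_solution3 (L : List Int) (m : Int) : Prop := m ≤ 0 ∨ m + 1 ≤ (L.length : Int)
instance (L : List Int) (m : Int) : Decidable (Pre_bsp_solution3 L m) := by
  unfold Pre_bsp_solution3; infer_instance

def pvWitness_bsp_solution3 : List Int × Int := ([0, 3, 4, 9], 2)

def Spec_bsp_solution3 (L : List Int) (m : Int) (out : List Int) : Prop := out = bsp_solution3_alt L m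
instance (L : List Int) (m : Int) (out : List Int) : Decidable (Spec_bsp_solution3 L m out) := by
  unfold Spec_bsp_solution3; infer_instance

-- ===== CLAIM (what is proved, stated in full; the proofs are below) =====
def Claim_equal_bsp_solution3 : Prop := ∀ (L : List Int) (m : Int), Dom_bsp_solution3 L m → Pre_bsp_solution3 L m → Spec_bsp_solution3 L m (bsp_solution3 L m)

-- ===== LEMMAS AND PROOFS =====

theorem length_mkSpans (L : List Int) : (mkSpans L).length = L.length - 2 := by
  simp only [mkSpans, List.length_map, List.length_zip, List.length_drop]; omega

theorem getElem_mkSpans (L : List Int) (j : Nat) (h : j < (mkSpans L).length) :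
    (mkSpans L)[j] = L[j + 2]'(by have := length_mkSpans L; omega) - L[j]'(by have := length_mkSpans L; omega) := by
  simp [mkSpans, Nat.add_comm]

-- the pair-state fold of A tracks exactly the Option-accumulator fold of min?
theorem foldl_minpair (g : Int → Int) (l : List Int) (acc : Option Int) (j0 : Int) :
    l.foldl
      (fun st i =>
        match st.1 with
        | none => (some (g i), i)
        | some md => if g i < md then (some (g i), i) else st)
      (acc.map g, acc.getD j0)
    = ((l.foldl (fun a i =>
          match a with
          | none => some i
          | some m => if g i < g m then some i else some m) acc).map g,
       (l.foldl (fun a i =>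
          match a with
          | none => some i
          | some m => if g i < g m then some i else some m) acc).getD j0) := by
  induction l generalizing acc with
  | nil => rfl
  | cons x t ih =>
    cases acc with
    | none => simpa using ih (some x)
    | some m =>
      by_cases h : g x < g m
      · simpa [h] using ih (some x)
      · simpa [h] using ih (some m)

-- A's argmin index equals B's k (over the spans of the same L)
theorem aArgmin_eq (L : List Int) :
    (aArgmin L).2 =
      ((PySem.List.min? (PySem.List.pyRange 0 ((mkSpans L).length : Int) 1)
          (fun i => PySem.List.pyGetD (mkSpans L) i 0)).getD 0) := by
  have hs := length_mkSpans L
  have hr : PySem.List.pyRange 0 ((L.length : Int) - 2) 1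
      = PySem.List.pyRange 0 (((mkSpans L).length : Int)) 1 := by
    rw [PySem.List.pyRange_one, PySem.List.pyRange_one]
    have : ((L.length : Int) - 2 - 0).toNat = (((mkSpans L).length : Int) - 0).toNat := by omega
    rw [this]
  unfold aArgmin
  rw [hr]
  have hcong :
      (PySem.List.pyRange 0 (((mkSpans L).length : Int)) 1).foldl
        (fun st i =>
          let d := PySem.List.pyGetD L (i + 2) 0 - PySem.List.pyGetD L i 0
          match st.1 with
          | none => (some d, i)
          | some md => if d < md then (some d, i) else st)
        (none, 0)
      = (PySem.List.pyRange 0 (((mkSpans L).length : Int)) 1).foldl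
        (fun st i =>
          match st.1 with
          | none => (some (PySem.List.pyGetD (mkSpans L) i 0), i)
          | some md => if PySem.List.pyGetD (mkSpans L) i 0 < md then
              (some (PySem.List.pyGetD (mkSpans L) i 0), i) else st)
        (none, 0) := by
    apply PySem.List.foldl_congr_mem
    intro acc i hi
    obtain ⟨h0, h1⟩ := (PySem.List.mem_pyRange_one).1 hi
    have hval : PySem.List.pyGetD L (i + 2) 0 - PySem.List.pyGetD L i 0
        = PySem.List.pyGetD (mkSpans L) i 0 := by
      rw [PySem.List.pyGetD_eq_getElem L 0 (by omega) (by omega),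
          PySem.List.pyGetD_eq_getElem L 0 (by omega) (by omega),
          PySem.List.pyGetD_eq_getElem (mkSpans L) 0 (by omega) (by omega),
          getElem_mkSpans L i.toNat (by omega)]
      simp [show (i + 2).toNat = i.toNat + 2 from by omega]
    simp only [hval]
  rw [hcong]
  have := foldl_minpair (fun i => PySem.List.pyGetD (mkSpans L) i 0)
      (PySem.List.pyRange 0 (((mkSpans L).length : Int)) 1) none 0
  simp only [Option.map_none, Option.getD_none] at this
  rw [this]
  show (List.foldl _ none _).getD 0 = _
  unfold PySem.List.min?
  congr 1
  apply PySem.List.foldl_congr_mem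
  intro acc x _
  cases acc <;> rfl

-- the B-side span bookkeeping really produces the spans of the shortened list
theorem mkSpans_erase (L : List Int) (k : Nat) (hk : k + 2 < L.length)
    (s1 s2 s3 : List Int)
    (e1 : s1 = (mkSpans L).eraseIdx k)
    (e2 : s2 = if 1 ≤ k then
        s1.set (k - 1) ((L.eraseIdx (k + 1)).getD (k + 1) 0 - (L.eraseIdx (k + 1)).getD (k - 1) 0)
      else s1)
    (e3 : s3 = if k < s2.length then
        s2.set k ((L.eraseIdx (k + 1)).getD (k + 2) 0 - (L.eraseIdx (k + 1)).getD k 0)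
      else s2) :
    s3 = mkSpans (L.eraseIdx (k + 1)) := by
  have hL' : (L.eraseIdx (k + 1)).length = L.length - 1 := by
    rw [List.length_eraseIdx]; simp only [if_pos (by omega : k + 1 < L.length)]
  have hsp := length_mkSpans L
  have hsp' := length_mkSpans (L.eraseIdx (k + 1))
  have hs1' : ((mkSpans L).eraseIdx k).length = L.length - 3 := by
    rw [List.length_eraseIdx, hsp]; simp only [if_pos (by omega : k < L.length - 2)]; omega
  have hs1 : s1.length = L.length - 3 := by rw [e1]; exact hs1'
  have hs2 : s2.length = L.length - 3 := by
    rw [e2]; split_ifs <;> simp [hs1]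
  have hLe : ∀ (j : Nat), j < L.length - 1 →
      (L.eraseIdx (k + 1)).getD j 0 = if j < k + 1 then L.getD j 0 else L.getD (j + 1) 0 := by
    intro j hj
    rw [List.getD_eq_getElem _ _ (by omega), List.getElem_eraseIdx (by omega)]
    split_ifs with h
    · rw [List.getD_eq_getElem _ _ (by omega)]
    · rw [List.getD_eq_getElem _ _ (by omega)]
  have hspe : ∀ (j : Nat), j < L.length - 2 →
      (mkSpans L).getD j 0 = L.getD (j + 2) 0 - L.getD j 0 := by
    intro j hj
    rw [List.getD_eq_getElem _ _ (by omega), getElem_mkSpans L j (by omega),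
        List.getD_eq_getElem _ _ (by omega), List.getD_eq_getElem _ _ (by omega)]
  have hs1e : ∀ (j : Nat), j < L.length - 3 →
      s1.getD j 0 = if j < k then (mkSpans L).getD j 0 else (mkSpans L).getD (j + 1) 0 := by
    intro j hj
    rw [e1, List.getD_eq_getElem _ _ (by omega), List.getElem_eraseIdx (by omega)]
    split_ifs with h
    · rw [List.getD_eq_getElem _ _ (by omega)]
    · rw [List.getD_eq_getElem _ _ (by omega)]
  apply List.ext_getElem
  · rw [e3]; split_ifs <;> simp [hs2, hsp', hL'] <;> omega
  · intro j h1 h2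
    have hj : j < L.length - 3 := by
      rw [e3] at h1; split_ifs at h1 <;> simp [hs2] at h1 <;> omega
    rw [getElem_mkSpans (L.eraseIdx (k + 1)) j (by omega)]
    rw [← List.getD_eq_getElem _ 0 h1]
    rw [← List.getD_eq_getElem _ 0 (by omega : j + 2 < (L.eraseIdx (k + 1)).length),
        ← List.getD_eq_getElem _ 0 (by omega : j < (L.eraseIdx (k + 1)).length)]
    rw [e3]
    by_cases c2 : k < s2.length
    · rw [if_pos c2]
      rw [List.getD_eq_getElem _ _ (by simp [hs2]; omega), List.getElem_set,
          ← List.getD_eq_getElem s2 0 (by omega : j < s2.length)]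
      rw [e2]
      by_cases c1 : 1 ≤ k
      · rw [if_pos c1]
        split_ifs with hjk
        · -- j = k: the freshly written span k
          subst hjk
          rw [hLe _ (by omega), hLe _ (by omega)]
        · rw [List.getD_eq_getElem _ _ (by simp [hs1]; omega), List.getElem_set,
              ← List.getD_eq_getElem s1 0 (by omega : j < s1.length)]
          split_ifs with hjk1
          · -- j = k - 1: the freshly written span k-1
            subst hjk1
            rw [show k - 1 + 2 = k + 1 from by omega, hLe _ (by omega), hLe _ (by omega)]
          · rw [hs1e _ (by omega)]
            split_ifs with hjk2
            · rw [hspe _ (by omega), hLe _ (by omega), hLe _ (by omega),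
                  if_pos (by omega : j + 2 < k + 1), if_pos (by omega : j < k + 1)]
            · rw [hspe _ (by omega), hLe _ (by omega), hLe _ (by omega),
                  if_neg (by omega : ¬ (j + 2 < k + 1)), if_neg (by omega : ¬ (j < k + 1))]
      · rw [if_neg c1]
        split_ifs with hjk
        · subst hjk
          rw [hLe _ (by omega), hLe _ (by omega)]
        · rw [hs1e _ (by omega)]
          rw [if_neg (by omega : ¬ (j < k))]
          rw [hspe _ (by omega), hLe _ (by omega), hLe _ (by omega),
              if_neg (by omega : ¬ (j + 2 < k + 1)), if_neg (by omega : ¬ (j < k + 1))]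
    · -- k ≥ len(s2): k is the last span index n-3 is excluded, so k = n-3 and j < k
      rw [if_neg c2]
      have hkn : k = L.length - 3 := by rw [hs2] at c2; omega
      rw [e2]
      by_cases c1 : 1 ≤ k
      · rw [if_pos c1]
        rw [List.getD_eq_getElem _ _ (by simp [hs1]; omega), List.getElem_set,
            ← List.getD_eq_getElem s1 0 (by omega : j < s1.length)]
        split_ifs with hjk1
        · -- j = k - 1
          subst hjk1
          rw [show k - 1 + 2 = k + 1 from by omega, hLe _ (by omega), hLe _ (by omega)]
        · rw [hs1e _ (by omega), if_pos (by omega : j < k)]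
          rw [hspe _ (by omega), hLe _ (by omega), hLe _ (by omega),
              if_pos (by omega : j + 2 < k + 1), if_pos (by omega : j < k + 1)]
      · -- k = 0 and k = n - 3 force n = 3: no index j exists
        omega

-- one step of B on a faithful state is one step of A, and the state stays faithful
theorem step_eq (L : List Int) (h2 : 2 ≤ L.length) :
    bStep (L, mkSpans L) = (aStep L, mkSpans (aStep L)) ∧ (aStep L).length = L.length - 1 := by
  have hsl := length_mkSpans L
  have hargm := aArgmin_eq L
  cases hmin : PySem.List.min? (PySem.List.pyRange 0 (((mkSpans L).length : Int)) 1)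
      (fun i => PySem.List.pyGetD (mkSpans L) i 0) with
  | none =>
    have hempty : PySem.List.pyRange 0 (((mkSpans L).length : Int)) 1 = [] := by
      exact (PySem.List.min?_eq_none_iff _ _).1 hmin
    have hn : (mkSpans L).length = 0 := by
      by_contra hne
      have h0 : (0 : Int) ∈ PySem.List.pyRange 0 (((mkSpans L).length : Int)) 1 :=
        (PySem.List.mem_pyRange_one).2 ⟨le_refl 0, by omega⟩
      rw [hempty] at h0
      simp at h0
    have hL2 : L.length = 2 := by omega
    have hspnil : mkSpans L = [] := List.eq_nil_of_length_eq_zero hn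
    have haS : aStep L = L.eraseIdx 1 := by
      unfold aStep
      rw [hargm, hmin]
      rw [show ((none : Option Int).getD 0 + 1 : Int) = ((1 : Nat) : Int) from by simp]
      rw [PySem.List.pop?_natCast L 1 (by omega)]
    have hlen : (aStep L).length = L.length - 1 := by
      rw [haS, List.length_eraseIdx]; simp only [if_pos (by omega : 1 < L.length)]
    refine ⟨?_, hlen⟩
    have hspnil' : mkSpans (aStep L) = [] := by
      apply List.eq_nil_of_length_eq_zero
      rw [length_mkSpans, hlen]; omega
    simp only [bStep, hspnil]
    rw [hspnil', haS]
    simp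
    rfl
  | some k0 =>
    have hk0mem := PySem.List.min?_mem hmin
    obtain ⟨hk0a, hk0b⟩ := (PySem.List.mem_pyRange_one).1 hk0mem
    have hknb : k0.toNat + 2 < L.length := by omega
    have haS : aStep L = L.eraseIdx (k0.toNat + 1) := by
      unfold aStep
      rw [hargm, hmin]
      rw [show ((some k0).getD 0 + 1 : Int) = ((k0.toNat + 1 : Nat) : Int) from by simp; omega]
      rw [PySem.List.pop?_natCast L (k0.toNat + 1) (by omega)]
    have hlen : (aStep L).length = L.length - 1 := by
      rw [haS, List.length_eraseIdx]; simp only [if_pos (by omega : k0.toNat + 1 < L.length)]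
    refine ⟨?_, hlen⟩
    have hv : ∀ (i : Int) (j : Nat), i = (j : Int) →
        PySem.List.pyGetD (L.eraseIdx (k0.toNat + 1)) i 0 = (L.eraseIdx (k0.toNat + 1)).getD j 0 := by
      intro i j hij
      subst hij
      rw [PySem.List.pyGetD_natCast]
    simp only [bStep, hmin]
    have hne : ¬ (mkSpans L).isEmpty = true := by
      rw [List.isEmpty_iff]
      intro hnil
      rw [hnil] at hsl
      simp at hsl
      omega
    rw [if_neg hne]
    simp only [Option.getD_some]
    rw [show (k0 + 1).toNat = k0.toNat + 1 from by omega]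
    rw [haS]
    refine Prod.ext rfl ?_
    have he2 :
        (if (1 : Int) ≤ k0 then
            ((mkSpans L).eraseIdx k0.toNat).set (k0 - 1).toNat
              (PySem.List.pyGetD (L.eraseIdx (k0.toNat + 1)) (k0 + 1) 0 -
                PySem.List.pyGetD (L.eraseIdx (k0.toNat + 1)) (k0 - 1) 0)
          else (mkSpans L).eraseIdx k0.toNat)
        = (if 1 ≤ k0.toNat then
            ((mkSpans L).eraseIdx k0.toNat).set (k0.toNat - 1)
              ((L.eraseIdx (k0.toNat + 1)).getD (k0.toNat + 1) 0 -
                (L.eraseIdx (k0.toNat + 1)).getD (k0.toNat - 1) 0)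
          else (mkSpans L).eraseIdx k0.toNat) := by
      by_cases hc : 1 ≤ k0.toNat
      · rw [if_pos (by omega : (1 : Int) ≤ k0), if_pos hc]
        rw [show (k0 - 1).toNat = k0.toNat - 1 from by omega,
            hv (k0 + 1) (k0.toNat + 1) (by omega), hv (k0 - 1) (k0.toNat - 1) (by omega)]
      · rw [if_neg (by omega : ¬ (1 : Int) ≤ k0), if_neg hc]
    rw [he2]
    have hYlen : (if 1 ≤ k0.toNat then
            ((mkSpans L).eraseIdx k0.toNat).set (k0.toNat - 1)
              ((L.eraseIdx (k0.toNat + 1)).getD (k0.toNat + 1) 0 -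
                (L.eraseIdx (k0.toNat + 1)).getD (k0.toNat - 1) 0)
          else (mkSpans L).eraseIdx k0.toNat).length = L.length - 3 := by
      split_ifs
      · rw [List.length_set, List.length_eraseIdx, hsl]
        simp only [if_pos (by omega : k0.toNat < L.length - 2)]; omega
      · rw [List.length_eraseIdx, hsl]
        simp only [if_pos (by omega : k0.toNat < L.length - 2)]; omega
    rw [hYlen]
    by_cases hc : k0.toNat < L.length - 3
    · rw [if_pos (by omega : k0 < ((L.length - 3 : Nat) : Int))]
      rw [hv (k0 + 2) (k0.toNat + 2) (by omega), hv k0 k0.toNat (by omega)]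
      have hYc : k0.toNat < (if 1 ≤ k0.toNat then
            ((mkSpans L).eraseIdx k0.toNat).set (k0.toNat - 1)
              ((L.eraseIdx (k0.toNat + 1)).getD (k0.toNat + 1) 0 -
                (L.eraseIdx (k0.toNat + 1)).getD (k0.toNat - 1) 0)
          else (mkSpans L).eraseIdx k0.toNat).length := by rw [hYlen]; exact hc
      exact mkSpans_erase L k0.toNat hknb _ _ _ rfl rfl (by rw [if_pos hYc])
    · rw [if_neg (by omega : ¬ k0 < ((L.length - 3 : Nat) : Int))]
      have hYc : ¬ k0.toNat < (if 1 ≤ k0.toNat then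
            ((mkSpans L).eraseIdx k0.toNat).set (k0.toNat - 1)
              ((L.eraseIdx (k0.toNat + 1)).getD (k0.toNat + 1) 0 -
                (L.eraseIdx (k0.toNat + 1)).getD (k0.toNat - 1) 0)
          else (mkSpans L).eraseIdx k0.toNat).length := by rw [hYlen]; exact hc
      exact mkSpans_erase L k0.toNat hknb _ _ _ rfl rfl (by rw [if_neg hYc])

theorem foldl_const {α : Type} (f : α → α) (l : List Int) (init : α) :
    l.foldl (fun s _ => f s) init = f^[l.length] init := by
  induction l generalizing init with
  | nil => rfl
  | cons x t ih => simp [List.foldl_cons, ih, Function.iterate_succ_apply]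

theorem iter_eq (t : Nat) (L : List Int) (h : t = 0 ∨ t + 1 ≤ L.length) :
    bStep^[t] (L, mkSpans L) = (aStep^[t] L, mkSpans (aStep^[t] L)) := by
  induction t generalizing L with
  | zero => simp
  | succ t ih =>
    have h2 : 2 ≤ L.length := by omega
    obtain ⟨hs, hl⟩ := step_eq L h2
    rw [Function.iterate_succ_apply, Function.iterate_succ_apply, hs]
    exact ih (aStep L) (by omega)

-- ===== VERDICT (by name: the statement is the Claim_ definition above) =====
theorem bsp_solution3_spec : Claim_equal_bsp_solution3 := by
  intro L m _ hpre
  unfold Spec_bsp_solution3 bsp_solution3 bsp_solution3_alt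
  rw [foldl_const aStep, foldl_const bStep]
  have hlen : (PySem.List.pyRange 0 m 1).length = m.toNat := by
    simp [PySem.List.length_pyRange_one]
  rw [hlen]
  have : bStep^[m.toNat] (L, mkSpans L) = (aStep^[m.toNat] L, mkSpans (aStep^[m.toNat] L)) := by
    apply iter_eq
    rcases hpre with h | h <;> omega
  rw [this]
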